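-- pv_equiv track=rewrite | github.com/zxxia/benchmarking | feature_analysis/features.py | object_appearance
-- ===== SOURCE A (Python) =====
-- def object_appearance(start, end, gt):
--     """Retun object life span and frames' new object information.
--
--     Return
--         object to frame range (dict)
--         frame id to a list of new object id (dict)
--
--     """
--     obj_to_frame_range = dict()
--     frame_to_new_obj = dict()
--     for frame_id in range(start, end+1):
--         if frame_id not in gt:
--             continue
--         boxes = gt[frame_id]
--         for box in boxes:
--             try:
--                 obj_id = int(box[-1])
--             except ValueError:
--                 obj_id = box[-1]
--
--             if obj_id in obj_to_frame_range:
--                 start, end = obj_to_frame_range[obj_id]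
--                 obj_to_frame_range[obj_id][0] = min(int(frame_id), start)
--                 obj_to_frame_range[obj_id][1] = max(int(frame_id), end)
--             else:
--                 obj_to_frame_range[obj_id] = [int(frame_id), int(frame_id)]
--
--     for obj_id in obj_to_frame_range:
--         if obj_to_frame_range[obj_id][0] in frame_to_new_obj:
--             frame_to_new_obj[obj_to_frame_range[obj_id][0]].append(obj_id)
--         else:
--             frame_to_new_obj[obj_to_frame_range[obj_id][0]] = [obj_id]
--
--     return obj_to_frame_range, frame_to_new_obj
-- ===== SOURCE B (Python) =====
-- def object_appearance(start, end, gt):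
--     # One pass collecting each object's frame list, then min/max per object,
--     # then bucket objects by their first frame.
--     frames = {}
--     for frame_id in range(start, end + 1):
--         if frame_id not in gt:
--             continue
--         for box in gt[frame_id]:
--             try:
--                 obj_id = int(box[-1])
--             except ValueError:
--                 obj_id = box[-1]
--             frames.setdefault(obj_id, []).append(int(frame_id))
--     obj_to_frame_range = {oid: [min(fs), max(fs)] for oid, fs in frames.items()}
--     frame_to_new_obj = {}
--     for oid, rng in obj_to_frame_range.items():
--         frame_to_new_obj.setdefault(rng[0], []).append(oid)
--     return obj_to_frame_range, frame_to_new_obj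
-- ===== Notes on version B (the rewrite author's own statement) =====
-- stated objective: alternative
-- what changed: Instead of maintaining a running [min,max] pair per object with in-place dict-list mutation, B collects each object's full frame list in one pass, derives [min(frames),max(frames)] in a second comprehension, and buckets new objects with setdefault/append.
-- outside the precondition, e.g. on object_appearance(0, 1, {0: [[]]}): A raises IndexError, B raises IndexError
import Mathlib
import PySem

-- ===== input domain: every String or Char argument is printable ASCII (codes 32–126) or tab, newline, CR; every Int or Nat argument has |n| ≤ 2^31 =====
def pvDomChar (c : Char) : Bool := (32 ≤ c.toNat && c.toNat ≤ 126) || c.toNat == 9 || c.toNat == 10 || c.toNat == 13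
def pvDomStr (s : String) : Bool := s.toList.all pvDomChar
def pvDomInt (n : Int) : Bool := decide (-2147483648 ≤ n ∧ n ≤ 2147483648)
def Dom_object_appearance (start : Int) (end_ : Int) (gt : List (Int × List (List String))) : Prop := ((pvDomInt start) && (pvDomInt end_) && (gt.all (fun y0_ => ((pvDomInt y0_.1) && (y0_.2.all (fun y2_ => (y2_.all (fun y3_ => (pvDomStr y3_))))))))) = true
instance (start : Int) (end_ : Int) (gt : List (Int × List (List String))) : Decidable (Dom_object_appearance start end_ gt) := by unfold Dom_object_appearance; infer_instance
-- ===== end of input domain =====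

-- ===== PORT A =====
-- B replaces A's running-[min,max] updates by collecting each object's frame list in one
-- pass and taking min/max per object afterwards (objective: alternative decomposition).
def object_appearance (start : Int) (end_ : Int) (gt : List (Int × List (List String))) :
    (List (Int × List Int)) × (List (Int × List Int)) :=
  let gtd : PySem.Dict Int (List (List String)) := PySem.Dict.mk gt
  let obj_to_frame_range : PySem.Dict Int (List Int) :=
    (PySem.List.pyRange start (end_ + 1) 1).foldl (fun o frame_id =>
      if !gtd.contains frame_id then o
      else
        (gtd.getD frame_id []).foldl (fun o box =>
          let obj_id : Int := ((PySem.List.pyGet? box (-1)).bind PySem.Int.ofStr?).getD 0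
          if o.contains obj_id then
            let r := o.getD obj_id []
            let s := PySem.List.pyGetD r 0 0
            let e := PySem.List.pyGetD r 1 0
            o.insert obj_id [min frame_id s, max frame_id e]
          else
            o.insert obj_id [frame_id, frame_id]) o)
      PySem.Dict.empty
  let frame_to_new_obj : PySem.Dict Int (List Int) :=
    obj_to_frame_range.keys.foldl (fun f obj_id =>
      let st := PySem.List.pyGetD (obj_to_frame_range.getD obj_id []) 0 0
      if f.contains st then f.insert st (f.getD st [] ++ [obj_id])
      else f.insert st [obj_id]) PySem.Dict.empty
  (obj_to_frame_range.items, frame_to_new_obj.items)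

def object_appearance_alt (start : Int) (end_ : Int) (gt : List (Int × List (List String))) :
    (List (Int × List Int)) × (List (Int × List Int)) :=
  let gtd : PySem.Dict Int (List (List String)) := PySem.Dict.mk gt
  let frames : PySem.Dict Int (List Int) :=
    (PySem.List.pyRange start (end_ + 1) 1).foldl (fun fr frame_id =>
      if !gtd.contains frame_id then fr
      else
        (gtd.getD frame_id []).foldl (fun fr box =>
          let obj_id : Int := ((PySem.List.pyGet? box (-1)).bind PySem.Int.ofStr?).getD 0
          fr.modify obj_id [] (· ++ [frame_id])) fr)
      PySem.Dict.empty
  let obj_to_frame_range : PySem.Dict Int (List Int) :=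
    PySem.Dict.mk (frames.items.map (fun p =>
      (p.1, [(PySem.List.min? p.2 (fun x => x)).getD 0, (PySem.List.max? p.2 (fun x => x)).getD 0])))
  let frame_to_new_obj : PySem.Dict Int (List Int) :=
    obj_to_frame_range.items.foldl (fun f p =>
      f.modify (PySem.List.pyGetD p.2 0 0) [] (· ++ [p.1])) PySem.Dict.empty
  (obj_to_frame_range.items, frame_to_new_obj.items)

-- ===== PRECONDITION & SPEC =====
-- Pre_ excludes inputs where some box of an in-range gt frame is empty (A raises
-- IndexError on box[-1]) or its last field is not int-parseable (A then keys the dict by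
-- the raw string, so its result is not a value of the declared Int-keyed type); it
-- conservatively also requires this of entries shadowed by a duplicate key, which a
-- Python dict cannot have anyway.
def Pre_object_appearance (start : Int) (end_ : Int) (gt : List (Int × List (List String))) : Prop :=
  ∀ p ∈ gt, (start ≤ p.1 ∧ p.1 ≤ end_) →
    ∀ box ∈ p.2, (((PySem.List.pyGet? box (-1)).bind PySem.Int.ofStr?).isSome = true)
instance (start : Int) (end_ : Int) (gt : List (Int × List (List String))) : Decidable (Pre_object_appearance start end_ gt) := by unfold Pre_object_appearance; infer_instance

def pvWitness_object_appearance : Int × Int × (List (Int × List (List String))) :=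
  (0, 2, [(1, [["a", "3"], ["b", " 4 "]]), (2, [["c", "3"]])])

def Spec_object_appearance (start : Int) (end_ : Int) (gt : List (Int × List (List String))) (out : (List (Int × List Int)) × (List (Int × List Int))) : Prop := out = object_appearance_alt start end_ gt
instance (start : Int) (end_ : Int) (gt : List (Int × List (List String))) (out : (List (Int × List Int)) × (List (Int × List Int))) : Decidable (Spec_object_appearance start end_ gt out) := by unfold Spec_object_appearance; infer_instance

-- ===== CLAIM (what is proved, stated in full; the proofs are below) =====
def Claim_equal_object_appearance : Prop := ∀ (start : Int) (end_ : Int) (gt : List (Int × List (List String))), Dom_object_appearance start end_ gt → Pre_object_appearance start end_ gt → Spec_object_appearance start end_ gt (object_appearance start end_ gt)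

-- ===== LEMMAS AND PROOFS =====

def pvMn (fs : List Int) : Int := (PySem.List.min? fs (fun x => x)).getD 0
def pvMx (fs : List Int) : Int := (PySem.List.max? fs (fun x => x)).getD 0

theorem pvMn_append (x : Int) (t : List Int) (y : Int) :
    pvMn ((x :: t) ++ [y]) = min (pvMn (x :: t)) y := by
  simp [pvMn, PySem.List.min?_id_cons, List.foldl_append]

theorem pvMx_append (x : Int) (t : List Int) (y : Int) :
    pvMx ((x :: t) ++ [y]) = max (pvMx (x :: t)) y := by
  simp [pvMx, PySem.List.max?_id_cons, List.foldl_append]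

def pvRel (o fr : PySem.Dict Int (List Int)) : Prop :=
  o = PySem.Dict.mk (fr.items.map (fun p => (p.1, [pvMn p.2, pvMx p.2]))) ∧
  fr.keys.Nodup ∧ ∀ p ∈ fr.items, p.2 ≠ []

theorem pv_get_map (fr : PySem.Dict Int (List Int)) (k : Int) :
    (PySem.Dict.mk (fr.items.map (fun p => (p.1, [pvMn p.2, pvMx p.2])))).get? k =
      (fr.get? k).map (fun fs => [pvMn fs, pvMx fs]) := by
  simp only [PySem.Dict.get?, List.find?_map]
  have hc : ((fun (p : Int × List Int) => p.1 == k) ∘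
      (fun (p : Int × List Int) => (p.1, [pvMn p.2, pvMx p.2]))) = (fun p => p.1 == k) := rfl
  rw [hc]
  cases h : List.find? (fun (p : Int × List Int) => p.1 == k) fr.items <;> simp [h]  

theorem pv_contains_map (fr : PySem.Dict Int (List Int)) (k : Int) :
    (PySem.Dict.mk (fr.items.map (fun p => (p.1, [pvMn p.2, pvMx p.2])))).contains k = fr.contains k := by
  rw [PySem.Dict.contains_eq_isSome_get?, PySem.Dict.contains_eq_isSome_get?, pv_get_map]
  cases fr.get? k <;> rfl

theorem pvRel_step (o fr : PySem.Dict Int (List Int)) (h : pvRel o fr) (fid k : Int) :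
    pvRel
      (if o.contains k then
         o.insert k [min fid (PySem.List.pyGetD (o.getD k []) 0 0),
                     max fid (PySem.List.pyGetD (o.getD k []) 1 0)]
       else o.insert k [fid, fid])
      (fr.modify k [] (· ++ [fid])) := by
  obtain ⟨ho, hnd, hne⟩ := h
  subst ho
  rw [PySem.Dict.modify]
  by_cases hc : fr.contains k = true
  · -- existing key
    obtain ⟨fs, hfs⟩ : ∃ fs, fr.get? k = some fs := by
      rw [PySem.Dict.contains_eq_isSome_get?] at hc
      exact Option.isSome_iff_exists.mp hc
    have hmem : (k, fs) ∈ fr.items := PySem.Dict.mem_items_of_get?_eq_some _ hfs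
    have hfsne : fs ≠ [] := hne _ hmem
    obtain ⟨x, t, rfl⟩ : ∃ x t, fs = x :: t := by
      cases fs with | nil => exact absurd rfl hfsne | cons x t => exact ⟨x, t, rfl⟩
    have hgd : fr.getD k [] = x :: t := by rw [PySem.Dict.getD_eq_get?_getD, hfs]; rfl
    have hgdo : (PySem.Dict.mk (fr.items.map (fun p => (p.1, [pvMn p.2, pvMx p.2])))).getD k [] =
        [pvMn (x :: t), pvMx (x :: t)] := by
      rw [PySem.Dict.getD_eq_get?_getD, pv_get_map, hfs]; rfl
    rw [if_pos (by rw [pv_contains_map]; exact hc), hgdo, hgd]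
    refine ⟨?_, ?_, ?_⟩
    · apply PySem.Dict.ext
      rw [PySem.Dict.items_insert_of_contains _ _ (by rw [pv_contains_map]; exact hc),
          PySem.Dict.items_insert_of_contains _ _ hc, List.map_map, List.map_map]
      apply List.map_congr_left
      intro p hp
      by_cases hpk : p.1 == k
      · simp only [Function.comp, hpk, if_pos]
        have g0 : PySem.List.pyGetD [pvMn (x :: t), pvMx (x :: t)] (0 : Int) 0 = pvMn (x :: t) := rfl
        have g1 : PySem.List.pyGetD [pvMn (x :: t), pvMx (x :: t)] (1 : Int) 0 = pvMx (x :: t) := rfl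
        rw [g0, g1, pvMn_append, pvMx_append, min_comm fid, max_comm fid]
      · simp only [Function.comp, hpk]
        simp [hpk]
    · exact PySem.Dict.nodup_keys_insert fr k ((x :: t) ++ [fid]) hnd
    · intro p hp
      rcases (PySem.Dict.mem_items_insert fr k _ p).mp hp with rfl | ⟨hpin, _⟩
      · simp [hgd]
      · exact hne _ hpin
  · -- new key
    have hcf : fr.contains k = false := by simpa using hc
    have hg : fr.get? k = none := (PySem.Dict.get?_eq_none_iff_contains fr k).mpr hcf
    have hgd : fr.getD k [] = [] := by rw [PySem.Dict.getD_eq_get?_getD, hg]; rfl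
    rw [if_neg (by rw [pv_contains_map, hcf]; simp)]
    refine ⟨?_, ?_, ?_⟩
    · apply PySem.Dict.ext
      rw [PySem.Dict.items_insert_of_not_contains _ _ (by rw [pv_contains_map]; exact hcf),
          PySem.Dict.items_insert_of_not_contains _ _ hcf, hgd, List.map_append]
      rfl
    · have := PySem.Dict.nodup_keys_insert fr k (fr.getD k [] ++ [fid]) hnd
      exact this
    · intro p hp
      rcases (PySem.Dict.mem_items_insert fr k _ p).mp hp with rfl | ⟨hpin, _⟩
      · simp [hgd]
      · exact hne _ hpin

theorem pv_step2 (f : PySem.Dict Int (List Int)) (st k : Int) :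
    (if f.contains st then f.insert st (f.getD st [] ++ [k]) else f.insert st [k]) =
      f.modify st [] (· ++ [k]) := by
  by_cases h : f.contains st = true
  · simp [PySem.Dict.modify, h]
  · simp [PySem.Dict.modify, h, PySem.Dict.getD_of_not_contains _ _ (by simpa using h)]

theorem pv_phase1_inner (boxes : List (List String)) (fid : Int)
    (o fr : PySem.Dict Int (List Int)) (h : pvRel o fr) :
    pvRel
      (boxes.foldl (fun o box =>
        let obj_id : Int := ((PySem.List.pyGet? box (-1)).bind PySem.Int.ofStr?).getD 0
        if o.contains obj_id then
          let r := o.getD obj_id []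
          let s := PySem.List.pyGetD r 0 0
          let e := PySem.List.pyGetD r 1 0
          o.insert obj_id [min fid s, max fid e]
        else o.insert obj_id [fid, fid]) o)
      (boxes.foldl (fun fr box =>
        let obj_id : Int := ((PySem.List.pyGet? box (-1)).bind PySem.Int.ofStr?).getD 0
        fr.modify obj_id [] (· ++ [fid])) fr) := by
  induction boxes generalizing o fr with
  | nil => exact h
  | cons b bs ih => exact ih _ _ (pvRel_step o fr h fid _)

theorem pv_phase1 (L : List Int) (gtd : PySem.Dict Int (List (List String)))
    (o fr : PySem.Dict Int (List Int)) (h : pvRel o fr) :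
    pvRel
      (L.foldl (fun o frame_id =>
        if !gtd.contains frame_id then o
        else (gtd.getD frame_id []).foldl (fun o box =>
          let obj_id : Int := ((PySem.List.pyGet? box (-1)).bind PySem.Int.ofStr?).getD 0
          if o.contains obj_id then
            let r := o.getD obj_id []
            let s := PySem.List.pyGetD r 0 0
            let e := PySem.List.pyGetD r 1 0
            o.insert obj_id [min frame_id s, max frame_id e]
          else o.insert obj_id [frame_id, frame_id]) o) o)
      (L.foldl (fun fr frame_id =>
        if !gtd.contains frame_id then fr
        else (gtd.getD frame_id []).foldl (fun fr box =>
          let obj_id : Int := ((PySem.List.pyGet? box (-1)).bind PySem.Int.ofStr?).getD 0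
          fr.modify obj_id [] (· ++ [frame_id])) fr) fr) := by
  induction L generalizing o fr with
  | nil => exact h
  | cons a L ih =>
    simp only [List.foldl_cons]
    apply ih
    cases hgt : gtd.contains a with
    | false => simpa using h
    | true =>
      simp only [hgt, Bool.not_true, Bool.false_eq_true, if_false]
      exact pv_phase1_inner _ _ _ _ h

theorem pv_phase2 (d : PySem.Dict Int (List Int)) (hnd : d.keys.Nodup) :
    d.keys.foldl (fun f obj_id =>
      let st := PySem.List.pyGetD (d.getD obj_id []) 0 0
      if f.contains st then f.insert st (f.getD st [] ++ [obj_id])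
      else f.insert st [obj_id]) PySem.Dict.empty =
    d.items.foldl (fun f p =>
      f.modify (PySem.List.pyGetD p.2 0 0) [] (· ++ [p.1])) PySem.Dict.empty := by
  have hk : d.keys = d.items.map (fun p => p.1) := by simp [PySem.Dict.keys]
  rw [hk, List.foldl_map]
  apply PySem.List.foldl_congr_mem
  intro acc p hp
  have hgd : d.getD p.1 [] = p.2 :=
    PySem.Dict.getD_of_mem_items d (by exact hp) hnd []
  simp only [hgd]
  exact pv_step2 acc _ _

theorem pv_keys_map (fr : PySem.Dict Int (List Int)) :
    (PySem.Dict.mk (fr.items.map (fun p => (p.1, [pvMn p.2, pvMx p.2])))).keys = fr.keys := by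
  simp [PySem.Dict.keys, List.map_map]

theorem pvRel_empty : pvRel PySem.Dict.empty PySem.Dict.empty := by
  refine ⟨rfl, by simp [PySem.Dict.keys, PySem.Dict.empty], by simp [PySem.Dict.empty]⟩

theorem pv_main (start end_ : Int) (gt : List (Int × List (List String))) :
    object_appearance start end_ gt = object_appearance_alt start end_ gt := by
  simp only [object_appearance, object_appearance_alt]
  obtain ⟨ho, hnd, -⟩ := pv_phase1 (PySem.List.pyRange start (end_ + 1) 1) (PySem.Dict.mk gt)
    PySem.Dict.empty PySem.Dict.empty pvRel_empty
  rw [ho]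
  set fr := (PySem.List.pyRange start (end_ + 1) 1).foldl (fun fr frame_id =>
      if !(PySem.Dict.mk gt).contains frame_id then fr
      else
        ((PySem.Dict.mk gt).getD frame_id []).foldl (fun fr box =>
          let obj_id : Int := ((PySem.List.pyGet? box (-1)).bind PySem.Int.ofStr?).getD 0
          fr.modify obj_id [] (· ++ [frame_id])) fr)
      PySem.Dict.empty with hfr
  have hnd2 : (PySem.Dict.mk (fr.items.map (fun p => (p.1, [pvMn p.2, pvMx p.2])))).keys.Nodup := by
    rw [pv_keys_map]; exact hnd
  rw [pv_phase2 _ hnd2]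
  rfl

-- ===== VERDICT (by name: the statement is the Claim_ definition above) =====
theorem object_appearance_spec : Claim_equal_object_appearance := by
  intro start end_ gt _ _
  exact pv_main start end_ gt
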